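-- pv_equiv track=rewrite | github.com/Mach3psilon/Programming-Basics | CENG113_260201058_HW4.py | find_the_difference_between_two_acid
-- ===== SOURCE A (Python) =====
-- def find_the_difference_between_two_acid(acid1,acid2):
--
--     difference = []
--     #It adds the length difference to the list.
--     difference.append(str(abs(len(acid1)-len(acid2))))
--     difference_number = 0
--     def find_the_difference(acid1,acid2):
--         #If one of the acids lenght is 0 it stops the recursion.
--         if len(acid1) == 0 or len(acid2) == 0 :
--             return ""
--         else:
--             #Every different element adds "1" to the list.
--             if acid1[0] != acid2[0] :
--                 difference.append(str(1))
--                 find_the_difference(acid1[1:],acid2[1:])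
--             #Every same element adds "0" to the list.
--             else :
--                 find_the_difference(acid1[1:],acid2[1:])
--                 difference.append(str(0))
--     find_the_difference(acid1,acid2)
--     #It summs all elements of the list.
--     for number in difference:
--         difference_number += int(number)
--
--     return difference_number
-- ===== SOURCE B (Python) =====
-- def find_the_difference_between_two_acid(acid1, acid2):
--     count = abs(len(acid1) - len(acid2))
--     for c1, c2 in zip(acid1, acid2):
--         if c1 != c2:
--             count += 1
--     return count
-- ===== Notes on version B (the rewrite author's own statement) =====
-- stated objective: faster
-- what changed: Replaces the recursion that slices both strings at every step while appending '0'/'1' strings to a list that is then re-parsed and summed, with a single zip loop counting mismatches on an integer accumulator started at the length difference.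
import Mathlib
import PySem

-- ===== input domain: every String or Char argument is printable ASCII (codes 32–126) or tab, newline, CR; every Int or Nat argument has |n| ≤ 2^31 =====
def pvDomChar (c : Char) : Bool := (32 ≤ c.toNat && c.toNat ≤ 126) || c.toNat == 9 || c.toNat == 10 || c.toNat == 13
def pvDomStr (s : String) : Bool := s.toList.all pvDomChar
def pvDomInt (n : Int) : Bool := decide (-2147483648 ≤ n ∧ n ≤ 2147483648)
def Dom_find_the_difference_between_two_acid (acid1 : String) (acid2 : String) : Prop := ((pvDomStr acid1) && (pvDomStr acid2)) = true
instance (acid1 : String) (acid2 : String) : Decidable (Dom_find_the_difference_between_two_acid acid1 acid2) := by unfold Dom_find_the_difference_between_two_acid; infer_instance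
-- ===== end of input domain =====

-- B replaces A's slicing recursion that accumulates "0"/"1" strings and re-parses them in a final
-- summation loop with a single zip loop on an integer accumulator (faster in a timing run).

-- ===== PORT A =====
-- hand port of Python's int(s): optional leading '-', then decimal digits, value by Horner fold.
-- Exact for every string A parses here: each element of `difference` is a str(<int>) result
-- (str(abs(...)), str(1), str(0)), i.e. an optional '-' followed by plain digits — no whitespace,
-- '+', or underscores ever occur, so the omitted int() features cannot change the behaviour.
def pvF (a : Int) (c : Char) : Int := 10 * a + ((c.toNat : Int) - 48)

def pvInt (s : String) : Int :=
  if s.toList.headD '0' = '-' then -(s.toList.tail.foldl pvF 0) else s.toList.foldl pvF 0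

-- inner recursion `find_the_difference`: the strings appended to `difference`, in append order
-- (mismatch: "1" before the recursive call; match: "0" after it)
def pvA_rec : List Char → List Char → List String
  | [], _ => []
  | _, [] => []
  | a :: as, b :: bs =>
    if a ≠ b then PySem.Int.toStr 1 :: pvA_rec as bs
    else pvA_rec as bs ++ [PySem.Int.toStr 0]

def find_the_difference_between_two_acid (acid1 : String) (acid2 : String) : Int :=
  let difference : List String :=
    [PySem.Int.toStr (((PySem.Str.len acid1 - PySem.Str.len acid2 : Int)).natAbs : Int)]
      ++ pvA_rec acid1.toList acid2.toList
  difference.foldl (fun difference_number number => difference_number + pvInt number) 0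

-- ===== PORT B =====
def find_the_difference_between_two_acid_alt (acid1 : String) (acid2 : String) : Int :=
  (acid1.toList.zip acid2.toList).foldl
    (fun count p => if p.1 ≠ p.2 then count + 1 else count)
    (((PySem.Str.len acid1 - PySem.Str.len acid2 : Int)).natAbs : Int)

-- ===== PRECONDITION & SPEC =====
def Spec_find_the_difference_between_two_acid (acid1 : String) (acid2 : String) (out : Int) : Prop := out = find_the_difference_between_two_acid_alt acid1 acid2
instance (acid1 : String) (acid2 : String) (out : Int) : Decidable (Spec_find_the_difference_between_two_acid acid1 acid2 out) := by unfold Spec_find_the_difference_between_two_acid; infer_instance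

-- ===== CLAIM (what is proved, stated in full; the proofs are below) =====
def Claim_equal_find_the_difference_between_two_acid : Prop := ∀ (acid1 : String) (acid2 : String), Dom_find_the_difference_between_two_acid acid1 acid2 → Spec_find_the_difference_between_two_acid acid1 acid2 (find_the_difference_between_two_acid acid1 acid2)

-- ===== LEMMAS AND PROOFS =====

-- accumulator lemma for Nat.toDigitsCore
theorem pv_toDigitsCore_append (fuel n : ℕ) (ds : List Char) :
    Nat.toDigitsCore 10 fuel n ds = Nat.toDigitsCore 10 fuel n [] ++ ds := by
  induction fuel generalizing n ds with
  | zero => simp [Nat.toDigitsCore]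
  | succ fuel ih =>
    simp only [Nat.toDigitsCore]
    by_cases h : n / 10 = 0
    · simp [h]
    · simp only [h, if_false]
      rw [ih (n / 10) [n % 10 |>.digitChar], ih (n / 10) ((n % 10).digitChar :: ds),
        List.append_assoc]
      rfl

theorem pv_digitChar_toNat (k : ℕ) (hk : k < 10) : ((Nat.digitChar k).toNat : Int) = k + 48 := by
  interval_cases k <;> rfl

theorem pv_digitChar_ne_dash (k : ℕ) : Nat.digitChar k ≠ '-' := by
  by_cases hk : k < 16
  · interval_cases k <;> decide
  · have h : Nat.digitChar k = '*' := by
      unfold Nat.digitChar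
      repeat rw [if_neg (by omega)]
    simp [h]

theorem pv_toDigitsCore_foldl (fuel n : ℕ) (h : n < fuel) (a : Int) :
    (Nat.toDigitsCore 10 fuel n []).foldl pvF a
      = a * 10 ^ (Nat.toDigitsCore 10 fuel n []).length + n := by
  induction fuel generalizing n a with
  | zero => omega
  | succ fuel ih =>
    simp only [Nat.toDigitsCore]
    by_cases h0 : n / 10 = 0
    · have hn : n < 10 := by omega
      simp [h0, List.foldl, pvF, Nat.mod_eq_of_lt hn]
      rw [pv_digitChar_toNat n hn]
      ring
    · have h1 : n / 10 < fuel := by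
        have : n / 10 < n := Nat.div_lt_self (by omega) (by omega)
        omega
      simp only [h0, if_false]
      rw [pv_toDigitsCore_append fuel (n / 10) [(n % 10).digitChar], List.foldl_append,
        ih (n / 10) h1 a]
      simp [List.foldl, pvF, pv_digitChar_toNat (n % 10) (by omega)]
      have : (10 : Int) * (n / 10 : ℕ) + (n % 10 : ℕ) = n := by
        push_cast
        omega
      ring_nf
      ring_nf at this
      omega

theorem pv_mem_toDigitsCore_ne_dash (fuel n : ℕ) (ds : List Char)
    (hds : ∀ c ∈ ds, c ≠ '-') : ∀ c ∈ Nat.toDigitsCore 10 fuel n ds, c ≠ '-' := by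
  induction fuel generalizing n ds with
  | zero => simpa [Nat.toDigitsCore] using hds
  | succ fuel ih =>
    simp only [Nat.toDigitsCore]
    by_cases h0 : n / 10 = 0
    · simp only [h0, if_true]
      intro c hc
      rcases List.mem_cons.mp hc with rfl | hc
      · exact pv_digitChar_ne_dash _
      · exact hds c hc
    · simp only [h0, if_false]
      refine ih (n / 10) _ ?_
      intro c hc
      rcases List.mem_cons.mp hc with rfl | hc
      · exact pv_digitChar_ne_dash _
      · exact hds c hc

theorem pv_foldl_toDigits (m : ℕ) : (Nat.toDigits 10 m).foldl pvF 0 = m := by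
  have := pv_toDigitsCore_foldl (m + 1) m (by omega) 0
  simpa [Nat.toDigits] using this

theorem pvInt_toStr (n : Int) : pvInt (PySem.Int.toStr n) = n := by
  unfold pvInt
  rw [PySem.Int.toList_toStr]
  unfold PySem.Int.toChars
  by_cases hn : n < 0
  · simp only [hn, if_true, List.headD, List.tail]
    rw [pv_foldl_toDigits]
    omega
  · simp only [hn, if_false]
    have hne : (Nat.toDigits 10 n.toNat).headD '0' ≠ '-' := by
      cases hcs : Nat.toDigits 10 n.toNat with
      | nil => decide
      | cons c cs =>
        have : c ∈ Nat.toDigits 10 n.toNat := by rw [hcs]; exact List.mem_cons_self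
        simpa using pv_mem_toDigitsCore_ne_dash (n.toNat + 1) n.toNat [] (by simp) c this
    rw [if_neg hne, pv_foldl_toDigits]
    omega

theorem pvA_rec_foldl (l1 l2 : List Char) (c : Int) :
    (pvA_rec l1 l2).foldl (fun difference_number number => difference_number + pvInt number) c
      = (l1.zip l2).foldl (fun count p => if p.1 ≠ p.2 then count + 1 else count) c := by
  induction l1 generalizing l2 c with
  | nil => cases l2 <;> simp [pvA_rec]
  | cons a as ih =>
    cases l2 with
    | nil => simp [pvA_rec]
    | cons b bs =>
      by_cases h : a = b <;>
        simp [pvA_rec, h, List.foldl_append, pvInt_toStr, ih]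

-- ===== VERDICT (by name: the statement is the Claim_ definition above) =====
theorem find_the_difference_between_two_acid_spec : Claim_equal_find_the_difference_between_two_acid := by
  intro a1 a2 _
  unfold Spec_find_the_difference_between_two_acid find_the_difference_between_two_acid
    find_the_difference_between_two_acid_alt
  simp only [List.singleton_append, List.foldl_cons, zero_add, pvInt_toStr, pvA_rec_foldl]
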